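-- pv_equiv track=rewrite | github.com/edutilos6666/CL_Uebung2 | Hausaufgabe6/HA6-copy0.py | calculate_whole_frequency
-- ===== SOURCE A (Python) =====
-- def calculate_whole_frequency (rules):
--     ret = dict()
--     for rule , freq in rules.items():
--         splitted = rule.split(" --> ")
--         value = ret.get(splitted[0], 0)
--         value += freq
--         ret[splitted[0]] = value
--
--     return ret
-- ===== SOURCE B (Python) =====
-- def calculate_whole_frequency(rules):
--     # total frequency per rule left-hand side: for each distinct lhs,
--     # sum the frequencies of all rules that start with it
--     pairs = [(rule.split(" --> ")[0], freq) for rule, freq in rules.items()]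
--     return {lhs: sum(f for k, f in pairs if k == lhs)
--             for lhs in dict.fromkeys(k for k, _ in pairs)}
-- ===== Notes on version B (the rewrite author's own statement) =====
-- stated objective: alternative
-- what changed: Replaces the one-pass hash accumulation (get-then-overwrite per rule) by a declarative two-phase computation: project the rules to (lhs, freq) pairs once, then build the result as a dict comprehension over the distinct lhs keys, each entry summing the frequencies of its matching pairs with an inner scan.
import Mathlib
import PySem

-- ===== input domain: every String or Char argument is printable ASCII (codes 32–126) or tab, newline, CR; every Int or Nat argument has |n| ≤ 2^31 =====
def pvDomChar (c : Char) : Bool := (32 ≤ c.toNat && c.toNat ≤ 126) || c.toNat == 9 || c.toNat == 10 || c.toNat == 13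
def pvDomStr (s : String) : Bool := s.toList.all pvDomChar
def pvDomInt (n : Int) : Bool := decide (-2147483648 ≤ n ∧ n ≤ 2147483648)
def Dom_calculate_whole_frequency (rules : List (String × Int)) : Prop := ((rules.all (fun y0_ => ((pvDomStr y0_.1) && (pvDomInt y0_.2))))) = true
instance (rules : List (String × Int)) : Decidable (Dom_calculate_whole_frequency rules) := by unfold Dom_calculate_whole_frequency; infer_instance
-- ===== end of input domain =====

-- ===== PORT A =====
-- B computes the same grouped totals as a dict comprehension over the distinct lhs keys
-- (inner scan per key) instead of A's one-pass hash accumulation; same return value.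
-- rule.split(" --> ")[0]: split with a nonempty separator never returns none/[], so the getD/headD defaults are unreachable
def pvLhs (rule : String) : String := ((PySem.Str.split? rule " --> ").getD []).headD ""

def calculate_whole_frequency (rules : List (String × Int)) : List (String × Int) :=
  (rules.foldl (fun ret p =>
      let splitted := pvLhs p.1
      let value := ret.getD splitted 0 + p.2
      ret.insert splitted value)
    PySem.Dict.empty).items

-- ===== PORT B =====
-- Source B: pairs = [(lhs, freq) …]; {lhs: sum(f for k,f in pairs if k == lhs) for lhs in dict.fromkeys(…)}
def calculate_whole_frequency_alt (rules : List (String × Int)) : List (String × Int) :=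
  let pairs := rules.map (fun p => (pvLhs p.1, p.2))
  (PySem.List.dedup (pairs.map Prod.fst)).map (fun lhs =>
    (lhs, ((pairs.filter (fun q => q.1 == lhs)).map Prod.snd).sum))

-- ===== PRECONDITION & SPEC =====
def Spec_calculate_whole_frequency (rules : List (String × Int)) (out : List (String × Int)) : Prop := out = calculate_whole_frequency_alt rules
instance (rules : List (String × Int)) (out : List (String × Int)) : Decidable (Spec_calculate_whole_frequency rules out) := by unfold Spec_calculate_whole_frequency; infer_instance

-- ===== CLAIM (what is proved, stated in full; the proofs are below) =====
def Claim_equal_calculate_whole_frequency : Prop := ∀ (rules : List (String × Int)), Dom_calculate_whole_frequency rules → Spec_calculate_whole_frequency rules (calculate_whole_frequency rules)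

-- ===== LEMMAS AND PROOFS =====

-- getD of A's accumulation loop: the start value plus the sum of frequencies of matching rules
theorem pv_getD_fold (l : List (String × Int)) (d : PySem.Dict String Int) (k : String) :
    (l.foldl (fun ret p => ret.insert (pvLhs p.1) (ret.getD (pvLhs p.1) 0 + p.2)) d).getD k 0
      = d.getD k 0 + ((l.filter (fun p => pvLhs p.1 == k)).map Prod.snd).sum := by
  induction l generalizing d with
  | nil => simp
  | cons p l ih =>
    simp only [List.foldl_cons, List.filter_cons, ih]
    rw [PySem.Dict.getD_insert]
    by_cases h : pvLhs p.1 == k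
    · simp only [h, if_pos]
      have hk : k = pvLhs p.1 := (beq_iff_eq.mp h).symm
      simp [hk, add_assoc]
    · simp only [h]
      have hk : ¬ k = pvLhs p.1 := fun e => h (beq_iff_eq.mpr e.symm)
      simp [hk]

theorem calculate_whole_frequency_eq (rules : List (String × Int)) :
    calculate_whole_frequency rules = calculate_whole_frequency_alt rules := by
  unfold calculate_whole_frequency calculate_whole_frequency_alt
  dsimp only
  set key : String × Int → String := fun p => pvLhs p.1 with hkey
  set pairs := rules.map (fun p => (pvLhs p.1, p.2)) with hpairs
  have hnd : (rules.foldl (fun ret p => ret.insert (key p) (ret.getD (key p) 0 + p.2))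
      PySem.Dict.empty).keys.Nodup :=
    PySem.Dict.nodup_keys_foldl_insert_key rules key _ _ (by simp)
  have hkeys : (rules.foldl (fun ret p => ret.insert (key p) (ret.getD (key p) 0 + p.2))
      PySem.Dict.empty).keys = PySem.Set.ofList (rules.map key) := by
    rw [PySem.Dict.keys_foldl_insert_key rules key _ _]
    simp [PySem.Dict.keys_empty, PySem.Set.update, PySem.Set.ofList_eq_foldl]
  rw [PySem.Dict.items_eq_map_keys _ hnd 0, hkeys]
  have hmapfst : pairs.map Prod.fst = rules.map key := by
    rw [hpairs, List.map_map]; rfl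
  rw [PySem.List.dedup_eq_ofList, hmapfst]
  apply List.map_congr_left
  intro k _
  rw [pv_getD_fold]
  have hfil : pairs.filter (fun q => q.1 == k)
      = (rules.filter (fun p => pvLhs p.1 == k)).map (fun p => (pvLhs p.1, p.2)) := by
    rw [hpairs, List.filter_map]; rfl
  rw [hfil]
  simp [List.map_map, PySem.Dict.getD_empty]
  rfl

-- ===== VERDICT (by name: the statement is the Claim_ definition above) =====
theorem calculate_whole_frequency_spec : Claim_equal_calculate_whole_frequency := by
  intro rules _
  unfold Spec_calculate_whole_frequency
  exact calculate_whole_frequency_eq rules
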